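-- pv_equiv track=rewrite | github.com/Rz108/Expression-Evaluator-and-Sorting-Assignment | error.py | validateInputParams
-- ===== SOURCE A (Python) =====
-- def validateInputParams(user_input):
--     stack = []
--     operators = set("+-*/**")
--
--     for i, char in enumerate(user_input):
--         if char == '(':
--             # Push the index of '(' onto the stack along with an empty content list and a count of root-level operators
--             # Use a list instead of a tuple to allow item assignment
--             stack.append([i, [], 0, False])  # index, content list, operator count, flag for **
--         elif char == ')':
--             if not stack:
--                 return False  # Unbalanced parentheses
--
--             start_index, content, operator_count, prev_char_star = stack.pop()
--             # Ensure there's exactly one root-level operator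
--             if operator_count != 1:
--                 return False
--
--         elif char in operators:
--             if stack:
--                 # Check if the operator is at the root level (not inside nested parentheses)
--                 if char == '*' and stack[-1][3]:  # Handle ** operator
--                     stack[-1][1].append(char)
--                     stack[-1][2] += 1  # Increment root-level operator count
--                     stack[-1][3] = False  # Reset flag for **
--                 elif char != '*' or (char == '*' and not stack[-1][3]):  # Other operators or single *
--                     stack[-1][1].append(char)
--                     stack[-1][2] += 1  # Increment root-level operator count
--                     stack[-1][3] = (char == '*')  # Set flag for ** if current char is *
--         else:
--             if stack:
--                 # Append non-operator characters to the current content list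
--                 stack[-1][1].append(char)
--                 stack[-1][3] = False  # Reset flag for ** if char is not an operator
--
--     # If stack is not empty, parentheses are not balanced
--     if stack:
--         return False
--
--     return True
-- ===== SOURCE B (Python) =====
-- def validateInputParams(user_input):
--     # Recursive-descent over parenthesis nesting instead of an explicit stack of frames.
--     n = len(user_input)
--
--     def group(i):
--         # parse the inside of a '(' group starting at index i; return index just
--         # past the matching ')' if the group holds exactly one operator char, else None
--         count = 0
--         while i < n:
--             c = user_input[i]
--             if c == '(':
--                 i = group(i + 1)
--                 if i is None:
--                     return None
--             elif c == ')':
--                 return i + 1 if count == 1 else None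
--             else:
--                 if c in '+-*/':
--                     count += 1
--                 i += 1
--         return None  # unclosed group
--
--     i = 0
--     while i < n:
--         c = user_input[i]
--         if c == '(':
--             i = group(i + 1)
--             if i is None:
--                 return False
--         elif c == ')':
--             return False  # surplus ')'
--         else:
--             i += 1
--     return True
-- ===== Notes on version B (the rewrite author's own statement) =====
-- stated objective: simpler
-- what changed: Replaces A's explicit stack of mutable frames (index, content list, operator count, **-flag) with a recursive-descent parser over parenthesis nesting: a helper parses one group at a time, counting operator characters at its own depth and requiring exactly one per group.
import Mathlib
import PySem

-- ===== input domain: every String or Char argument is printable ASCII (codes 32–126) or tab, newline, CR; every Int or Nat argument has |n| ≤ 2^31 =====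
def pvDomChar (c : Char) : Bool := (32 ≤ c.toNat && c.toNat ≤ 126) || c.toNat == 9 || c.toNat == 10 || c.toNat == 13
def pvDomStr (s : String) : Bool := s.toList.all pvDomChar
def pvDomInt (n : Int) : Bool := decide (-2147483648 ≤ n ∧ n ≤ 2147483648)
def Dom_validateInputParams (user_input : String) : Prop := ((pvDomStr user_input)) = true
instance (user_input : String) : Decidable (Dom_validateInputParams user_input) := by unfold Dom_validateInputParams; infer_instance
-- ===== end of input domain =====

-- B replaces A's explicit stack of mutable frames with a recursive-descent parser
-- over parenthesis nesting (objective: simpler; same return value).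

-- ===== PORT A =====
-- operators = set("+-*/**")
def vipOperators : PySem.Set Char := PySem.Set.ofList "+-*/**".toList

-- frame = [index, content list, operator count, flag for **]
-- the for-loop over enumerate(user_input): i is the running index, cs the remaining chars
def vipLoop (i : Int) (cs : List Char) (stack : List (Int × List Char × Int × Bool)) : Bool :=
  match cs with
  | [] => stack.isEmpty
  | c :: rest =>
    if c = '(' then
      vipLoop (i + 1) rest ((i, ([] : List Char), (0 : Int), false) :: stack)
    else if c = ')' then
      match stack with
      | [] => false                       -- unbalanced parentheses
      | (_, _, cnt, _) :: tl => if cnt ≠ 1 then false else vipLoop (i + 1) rest tl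
    else if c ∈ vipOperators then
      match stack with
      | [] => vipLoop (i + 1) rest stack
      | (si, content, cnt, flag) :: tl =>
        if c = '*' ∧ flag then
          vipLoop (i + 1) rest ((si, content ++ [c], cnt + 1, false) :: tl)
        else if c ≠ '*' ∨ (c = '*' ∧ ¬flag) then
          vipLoop (i + 1) rest ((si, content ++ [c], cnt + 1, decide (c = '*')) :: tl)
        else
          vipLoop (i + 1) rest stack
    else
      match stack with
      | [] => vipLoop (i + 1) rest stack
      | (si, content, cnt, flag) :: tl =>
        vipLoop (i + 1) rest ((si, content ++ [c], cnt, false) :: tl)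

def validateInputParams (user_input : String) : Bool :=
  vipLoop 0 user_input.toList []

-- ===== PORT B =====
-- c in '+-*/'
def altOps : List Char := "+-*/".toList

-- group(i): parse the inside of a '(' group; returns the suffix just past the matching
-- ')' (as a subtype carrying the length decrease Python's index increase guarantees),
-- none where the Python helper returns None.
def grpB (cs : List Char) (count : Int) : Option {r : List Char // r.length < cs.length} :=
  match cs with
  | [] => none                            -- unclosed group
  | c :: rest =>
    if c = '(' then
      match grpB rest 0 with
      | none => none
      | some ⟨r, hr⟩ =>
        match grpB r count with
        | none => none
        | some ⟨r2, hr2⟩ => some ⟨r2, by simp only [List.length_cons]; omega⟩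
    else if c = ')' then
      if count = 1 then some ⟨rest, by simp only [List.length_cons]; omega⟩ else none
    else
      match grpB rest (if c ∈ altOps then count + 1 else count) with
      | none => none
      | some ⟨r, hr⟩ => some ⟨r, by simp only [List.length_cons]; omega⟩
termination_by cs.length
decreasing_by all_goals simp only [List.length_cons]; omega

-- the top-level scan: ignores non-paren chars, parses each group, rejects surplus ')'
def topB (cs : List Char) : Bool :=
  match cs with
  | [] => true
  | c :: rest =>
    if c = '(' then
      match grpB rest 0 with
      | none => false
      | some ⟨r, hr⟩ => topB r
    else if c = ')' then false
    else topB rest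
termination_by cs.length
decreasing_by all_goals simp only [List.length_cons]; omega

def validateInputParams_alt (user_input : String) : Bool :=
  topB user_input.toList

-- ===== PRECONDITION & SPEC =====
def Spec_validateInputParams (user_input : String) (out : Bool) : Prop := out = validateInputParams_alt user_input
instance (user_input : String) (out : Bool) : Decidable (Spec_validateInputParams user_input out) := by unfold Spec_validateInputParams; infer_instance

-- ===== CLAIM (what is proved, stated in full; the proofs are below) =====
def Claim_equal_validateInputParams : Prop := ∀ (user_input : String), Dom_validateInputParams user_input → Spec_validateInputParams user_input (validateInputParams user_input)

-- ===== LEMMAS AND PROOFS =====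

-- proof-side clean loop: A's loop with the dead state (index, content list) stripped;
-- a stack frame keeps only (operator count, **-flag)
def vLoop (cs : List Char) (st : List (Int × Bool)) : Bool :=
  match cs with
  | [] => st.isEmpty
  | c :: rest =>
    if c = '(' then
      vLoop rest (((0 : Int), false) :: st)
    else if c = ')' then
      match st with
      | [] => false
      | (cnt, _) :: tl => if cnt ≠ 1 then false else vLoop rest tl
    else if c ∈ vipOperators then
      match st with
      | [] => vLoop rest st
      | (cnt, flag) :: tl =>
        if c = '*' ∧ flag then vLoop rest ((cnt + 1, false) :: tl)
        else if c ≠ '*' ∨ (c = '*' ∧ ¬flag) then vLoop rest ((cnt + 1, decide (c = '*')) :: tl)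
        else vLoop rest st
    else
      match st with
      | [] => vLoop rest st
      | (cnt, flag) :: tl => vLoop rest ((cnt, false) :: tl)

def frameData (f : Int × List Char × Int × Bool) : Int × Bool := (f.2.2.1, f.2.2.2)

lemma ops_eq : vipOperators = altOps := by decide

lemma vipLoop_eq_vLoop (cs : List Char) :
    ∀ (i : Int) (stack : List (Int × List Char × Int × Bool)),
    vipLoop i cs stack = vLoop cs (stack.map frameData) := by
  induction cs with
  | nil => intro i stack; cases stack <;> simp [vipLoop, vLoop]
  | cons c rest ih =>
    intro i stack
    simp only [vipLoop, vLoop]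
    split_ifs with h1 h2 h3
    · exact ih _ _
    · cases stack with
      | nil => simp
      | cons f tl =>
        obtain ⟨si, content, cnt, flag⟩ := f
        simp only [List.map_cons, frameData]
        split_ifs <;> simp [ih, frameData]
    · cases stack with
      | nil => simpa using ih _ _
      | cons f tl =>
        obtain ⟨si, content, cnt, flag⟩ := f
        simp only [List.map_cons, frameData]
        split_ifs <;> simp [ih, frameData]
    · cases stack with
      | nil => simpa using ih _ _
      | cons f tl =>
        obtain ⟨si, content, cnt, flag⟩ := f
        simp [ih, frameData]

lemma vLoop_grpB : ∀ (n : Nat) (cs : List Char), cs.length ≤ n →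
    ∀ (cnt : Int) (flag : Bool) (tl : List (Int × Bool)),
    vLoop cs ((cnt, flag) :: tl) =
      match grpB cs cnt with
      | none => false
      | some r => vLoop r.val tl := by
  intro n
  induction n with
  | zero =>
    intro cs h cnt flag tl
    have : cs = [] := List.eq_nil_of_length_eq_zero (Nat.le_zero.mp h)
    subst this
    simp [vLoop, grpB]
  | succ n ih =>
    intro cs h cnt flag tl
    cases cs with
    | nil => simp [vLoop, grpB]
    | cons c rest =>
      have hrest : rest.length ≤ n := by simpa using h
      rw [vLoop, grpB]
      by_cases h1 : c = '('
      · rw [if_pos h1, if_pos h1]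
        rw [ih rest hrest 0 false ((cnt, flag) :: tl)]
        cases hg : grpB rest 0 with
        | none => simp [hg]
        | some r =>
          obtain ⟨r, hr⟩ := r
          simp only [hg]
          rw [ih r (by omega) cnt flag tl]
          cases hg2 : grpB r cnt with
          | none => simp [hg2]
          | some r2 => simp [hg2]
      · by_cases h2 : c = ')'
        · rw [if_neg h1, if_pos h2, if_neg h1, if_pos h2]
          by_cases hc : cnt = 1 <;> simp [hc]
        · by_cases h3 : c ∈ vipOperators
          · have h3' : c ∈ altOps := by rwa [ops_eq] at h3
            rw [if_neg h1, if_neg h2, if_pos h3, if_neg h1, if_neg h2, if_pos h3']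
            have key : ∀ fl : Bool, vLoop rest ((cnt + 1, fl) :: tl) =
                match grpB rest (cnt + 1) with
                | none => false
                | some r => vLoop r.val tl := fun fl => ih rest hrest (cnt + 1) fl tl
            by_cases h4 : c = '*' ∧ flag = true
            · rw [if_pos h4, key]
              cases hg : grpB rest (cnt + 1) with
              | none => simp [hg]
              | some r => simp [hg]
            · rw [if_neg h4]
              have h5 : c ≠ '*' ∨ (c = '*' ∧ ¬flag = true) := by tauto
              rw [if_pos h5, key]
              cases hg : grpB rest (cnt + 1) with
              | none => simp [hg]
              | some r => simp [hg]
          · have h3' : c ∉ altOps := by rw [ops_eq] at h3; exact h3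
            rw [if_neg h1, if_neg h2, if_neg h3, if_neg h1, if_neg h2, if_neg h3']
            rw [ih rest hrest cnt false tl]
            cases hg : grpB rest cnt with
            | none => simp [hg]
            | some r => simp [hg]

lemma vLoop_topB : ∀ (n : Nat) (cs : List Char), cs.length ≤ n →
    vLoop cs [] = topB cs := by
  intro n
  induction n with
  | zero =>
    intro cs h
    have : cs = [] := List.eq_nil_of_length_eq_zero (Nat.le_zero.mp h)
    subst this
    simp [vLoop, topB]
  | succ n ih =>
    intro cs h
    cases cs with
    | nil => simp [vLoop, topB]
    | cons c rest =>
      have hrest : rest.length ≤ n := by simpa using h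
      rw [vLoop, topB]
      by_cases h1 : c = '('
      · rw [if_pos h1, if_pos h1]
        rw [vLoop_grpB rest.length rest le_rfl 0 false []]
        cases hg : grpB rest 0 with
        | none => simp [hg]
        | some r =>
          obtain ⟨r, hr⟩ := r
          simp only [hg]
          exact ih r (by omega)
      · by_cases h2 : c = ')'
        · rw [if_neg h1, if_pos h2, if_neg h1, if_pos h2]
        · by_cases h3 : c ∈ vipOperators
          · rw [if_neg h1, if_neg h2, if_pos h3, if_neg h1, if_neg h2]
            exact ih rest hrest
          · rw [if_neg h1, if_neg h2, if_neg h3, if_neg h1, if_neg h2]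
            exact ih rest hrest

-- ===== VERDICT (by name: the statement is the Claim_ definition above) =====
theorem validateInputParams_spec : Claim_equal_validateInputParams := by
  intro s _
  unfold Spec_validateInputParams validateInputParams validateInputParams_alt
  rw [vipLoop_eq_vLoop]
  simpa using vLoop_topB s.toList.length s.toList le_rfl
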